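-- pv_equiv track=rewrite | github.com/Rabbitminers/Baxtableep-site | baxtableep/test.py | find_swapped_match
-- ===== SOURCE A (Python) =====
-- def find_swapped_match(test: str, other: str, char_swaps: dict) -> bool:
--     swap_chars = set(c for c in other if c in char_swaps)
--     for c in swap_chars:
--         for swap in char_swaps[c]:
--             s2_swap = other.replace(c, swap)
--             if s2_swap == test:
--                 return True
--     return False
-- ===== SOURCE B (Python) =====
-- def find_swapped_match(test: str, other: str, char_swaps: dict) -> bool:
--     # For each distinct char c of `other` that is a swap key, the replacement
--     # string that could turn `other` into `test` is uniquely determined: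
--     # its width follows from the length difference and the count of c, and its
--     # text is read off `test` at the first occurrence of c.  One replace-check
--     # per char, then a membership test in the swap list.
--     diff = len(test) - len(other)
--     for c in set(other):
--         swaps = char_swaps.get(c)
--         if swaps is None:
--             continue
--         k = other.count(c)
--         if diff % k != 0:
--             continue
--         width = diff // k + 1
--         if width < 0:
--             continue
--         i = other.index(c)
--         cand = test[i:i + width]
--         if other.replace(c, cand) == test and cand in swaps:
--             return True
--     return False
-- ===== Notes on version B (the rewrite author's own statement) =====
-- stated objective: alternative
-- what changed: Instead of trying every swap string with a full replace-and-compare (one replace per swap), B reconstructs for each distinct character of `other` the unique replacement substring that could turn `other` into `test` (width from the length difference and the character count, text read off `test` at the first occurrence), does a single replace check per character, and finishes with a membership test in that character's swap list.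
import Mathlib
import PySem

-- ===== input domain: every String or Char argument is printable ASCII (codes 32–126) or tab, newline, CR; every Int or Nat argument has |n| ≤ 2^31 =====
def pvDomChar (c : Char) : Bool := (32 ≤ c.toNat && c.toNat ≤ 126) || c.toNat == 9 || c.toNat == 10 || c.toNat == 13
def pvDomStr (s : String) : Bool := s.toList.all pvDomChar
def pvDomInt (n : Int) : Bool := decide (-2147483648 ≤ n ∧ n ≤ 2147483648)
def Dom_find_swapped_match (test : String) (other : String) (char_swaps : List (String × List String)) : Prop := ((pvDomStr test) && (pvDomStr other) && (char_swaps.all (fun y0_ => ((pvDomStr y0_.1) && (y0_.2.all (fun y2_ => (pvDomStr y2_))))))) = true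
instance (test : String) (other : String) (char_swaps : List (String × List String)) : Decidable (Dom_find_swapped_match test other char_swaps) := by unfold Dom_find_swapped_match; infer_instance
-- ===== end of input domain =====

-- ===== PORT A =====
-- B replaces A's try-every-swap replace loop by reconstructing the unique candidate
-- replacement substring per distinct character, then checking it for membership in
-- the swap list; objective: alternative.
def find_swapped_match (test : String) (other : String) (char_swaps : List (String × List String)) : Bool :=
  let d : PySem.Dict String (List String) := PySem.Dict.mk char_swaps
  let swap_chars : PySem.Set Char :=
    PySem.Set.ofList (other.toList.filter (fun c => d.contains (String.ofList [c])))
  swap_chars.any (fun c =>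
    (d.getD (String.ofList [c]) []).any (fun swap =>
      PySem.Str.replace other (String.ofList [c]) swap == test))

-- ===== PORT B =====
def find_swapped_match_alt (test : String) (other : String) (char_swaps : List (String × List String)) : Bool :=
  let d : PySem.Dict String (List String) := PySem.Dict.mk char_swaps
  let diff : Int := PySem.Str.len test - PySem.Str.len other
  (PySem.Set.ofList other.toList).any (fun c =>
    match d.get? (String.ofList [c]) with
    | none => false
    | some swaps =>
      let k : Int := (PySem.Str.count other (String.ofList [c]) : Int)
      if PySem.Int.mod diff k ≠ 0 then false
      else
        let width : Int := PySem.Int.floordiv diff k + 1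
        if width < 0 then false
        else
          -- other.index(c): c is a character of other here, so index = find
          let i : Int := PySem.Str.find other (String.ofList [c])
          let cand : String := PySem.Str.slice test (some i) (some (i + width))
          (PySem.Str.replace other (String.ofList [c]) cand == test) && swaps.contains cand)

-- ===== PRECONDITION & SPEC =====
def Spec_find_swapped_match (test : String) (other : String) (char_swaps : List (String × List String)) (out : Bool) : Prop := out = find_swapped_match_alt test other char_swaps
instance (test : String) (other : String) (char_swaps : List (String × List String)) (out : Bool) : Decidable (Spec_find_swapped_match test other char_swaps out) := by unfold Spec_find_swapped_match; infer_instance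

-- ===== CLAIM (what is proved, stated in full; the proofs are below) =====
def Claim_equal_find_swapped_match : Prop := ∀ (test : String) (other : String) (char_swaps : List (String × List String)), Dom_find_swapped_match test other char_swaps → Spec_find_swapped_match test other char_swaps (find_swapped_match test other char_swaps)

-- ===== LEMMAS AND PROOFS =====

-- `other.replace(c, w)` for a single character c, in flatMap form
def pvRepl (c : Char) (w : List Char) (l : List Char) : List Char :=
  l.flatMap (fun x => if x = c then w else [x])

theorem pvRepl_go_eq (c : Char) (w : List Char) :
    ∀ (l : List Char) (fuel : Nat) (acc : List Char), l.length ≤ fuel →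
      PySem.Chars.replace.go [c] w fuel l acc = acc.reverse ++ pvRepl c w l := by
  intro l
  induction l with
  | nil =>
    intro fuel acc _
    cases fuel <;> simp [PySem.Chars.replace.go, pvRepl]
  | cons x t ih =>
    intro fuel acc hlen
    cases fuel with
    | zero => simp at hlen
    | succ f =>
      by_cases hx : x = c
      · subst hx
        have : PySem.Chars.replace.go [x] w (f+1) (x :: t) acc
            = PySem.Chars.replace.go [x] w f t (w.reverse ++ acc) := by
          simp [PySem.Chars.replace.go, List.isPrefixOf]
        rw [this, ih f (w.reverse ++ acc) (by simpa using hlen)]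
        simp [pvRepl]
      · have : PySem.Chars.replace.go [c] w (f+1) (x :: t) acc
            = PySem.Chars.replace.go [c] w f t (x :: acc) := by
          simp [PySem.Chars.replace.go, List.isPrefixOf, hx]
          intro h; exact absurd h.symm hx
        rw [this, ih f (x :: acc) (by simpa using hlen)]
        simp [pvRepl, hx]

theorem replace_single (o w : List Char) (c : Char) :
    PySem.Chars.replace o [c] w = pvRepl c w o := by
  have h := pvRepl_go_eq c w o o.length [] (le_refl _)
  simpa [PySem.Chars.replace] using h

theorem count_go_eq (c : Char) :
    ∀ (l : List Char) (fuel : Nat) (acc : Nat), l.length ≤ fuel →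
      PySem.Chars.count.go [c] fuel l acc = acc + l.count c := by
  intro l
  induction l with
  | nil => intro fuel acc _; cases fuel <;> simp [PySem.Chars.count.go]
  | cons x t ih =>
    intro fuel acc hlen
    cases fuel with
    | zero => simp at hlen
    | succ f =>
      by_cases hx : x = c
      · subst hx
        have : PySem.Chars.count.go [x] (f+1) (x :: t) acc
            = PySem.Chars.count.go [x] f t (acc + 1) := by
          simp [PySem.Chars.count.go, List.isPrefixOf]
        rw [this, ih f (acc+1) (by simpa using hlen)]
        simp [List.count_cons]
        omega
      · have : PySem.Chars.count.go [c] (f+1) (x :: t) acc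
            = PySem.Chars.count.go [c] f t acc := by
          simp [PySem.Chars.count.go, List.isPrefixOf, hx]
          intro h; exact absurd h.symm hx
        rw [this, ih f acc (by simpa using hlen)]
        simp [List.count_cons, hx]

theorem count_single (o : List Char) (c : Char) :
    PySem.Chars.count o [c] = o.count c := by
  have h := count_go_eq c o o.length 0 (le_refl _)
  simpa [PySem.Chars.count] using h

theorem find_go_eq (c : Char) :
    ∀ (l : List Char) (k : Nat), c ∈ l →
      PySem.Chars.find.go [c] l k = (k : Int) + l.idxOf c := by
  intro l
  induction l with
  | nil => intro k h; simp at h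
  | cons x t ih =>
    intro k h
    by_cases hx : x = c
    · subst hx
      simp [PySem.Chars.find.go, List.isPrefixOf, List.idxOf_cons_self]
    · have hct : c ∈ t := by
        rcases List.mem_cons.mp h with h1 | h1
        · exact absurd h1.symm hx
        · exact h1
      have : PySem.Chars.find.go [c] (x :: t) k = PySem.Chars.find.go [c] t (k+1) := by
        simp [PySem.Chars.find.go, List.isPrefixOf, hx]
        intro h; exact absurd h.symm hx
      rw [this, ih (k+1) hct]
      have hne : x ≠ c := hx
      rw [List.idxOf_cons_ne _ hne]
      push_cast
      ring

theorem find_single (o : List Char) (c : Char) (h : c ∈ o) :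
    PySem.Chars.find o [c] = (o.idxOf c : Int) := by
  simpa [PySem.Chars.find] using find_go_eq c o 0 h

theorem pvRepl_of_not_mem {c : Char} {w l : List Char} (h : c ∉ l) : pvRepl c w l = l := by
  induction l with
  | nil => simp [pvRepl]
  | cons x t ih =>
    have hx : x ≠ c := fun hh => h (hh ▸ List.mem_cons_self)
    have ht : c ∉ t := fun hh => h (List.mem_cons_of_mem _ hh)
    simp [pvRepl, hx] at *
    exact ih ht

theorem length_pvRepl (c : Char) (w l : List Char) :
    (pvRepl c w l).length + l.count c = l.length + l.count c * w.length := by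
  induction l with
  | nil => simp [pvRepl]
  | cons x t ih =>
    by_cases hx : x = c
    · subst hx
      have hrw : pvRepl x w (x :: t) = w ++ pvRepl x w t := by simp [pvRepl]
      rw [hrw, List.length_append, List.count_cons_self, List.length_cons, Nat.succ_mul]
      omega
    · have hrw : pvRepl c w (x :: t) = x :: pvRepl c w t := by simp [pvRepl, hx]
      have hcnt : (x :: t).count c = t.count c := by simp [List.count_cons, hx]
      rw [hrw, hcnt, List.length_cons, List.length_cons]
      omega

theorem split_at_idxOf {c : Char} {l : List Char} (h : c ∈ l) :
    ∃ pre suf, l = pre ++ c :: suf ∧ c ∉ pre ∧ pre.length = l.idxOf c := by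
  induction l with
  | nil => simp at h
  | cons x t ih =>
    by_cases hx : x = c
    · subst hx
      exact ⟨[], t, by simp, by simp, by simp⟩
    · have hct : c ∈ t := by
        rcases List.mem_cons.mp h with h1 | h1
        · exact absurd h1.symm hx
        · exact h1
      obtain ⟨pre, suf, h1, h2, h3⟩ := ih hct
      refine ⟨x :: pre, suf, by simp [h1], ?_, ?_⟩
      · intro hm
        rcases List.mem_cons.mp hm with hm | hm
        · exact hx hm.symm
        · exact h2 hm
      · rw [List.idxOf_cons_ne _ hx]
        simp [h3]

theorem pvRepl_split {c : Char} {w pre suf : List Char} (h : c ∉ pre) :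
    pvRepl c w (pre ++ c :: suf) = pre ++ w ++ pvRepl c w suf := by
  simp [pvRepl, List.flatMap_append]
  rw [show (pre.flatMap fun x => if x = c then w else [x]) = pvRepl c w pre from rfl,
      pvRepl_of_not_mem h]

-- the forward key facts: from pvRepl c w o = t, the arithmetic and the candidate slice
theorem forward_facts {t o w : List Char} {c : Char} (hc : c ∈ o) (H : pvRepl c w o = t) :
    ((t.length : Int) - o.length) = (o.count c : Int) * ((w.length : Int) - 1)
    ∧ (t.drop (o.idxOf c)).take w.length = w := by
  obtain ⟨pre, suf, hsplit, hpre, hlen⟩ := split_at_idxOf hc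
  constructor
  · have hl := length_pvRepl c w o
    rw [H] at hl
    have h2 : (t.length : Int) + o.count c = o.length + o.count c * w.length := by
      exact_mod_cast hl
    rw [mul_sub, mul_one]
    linarith
  · have hlen' : List.idxOf c (pre ++ c :: suf) = pre.length := by rw [← hsplit, ← hlen]
    rw [← H, hsplit, pvRepl_split hpre, hlen']
    rw [List.append_assoc, List.drop_left, List.take_left]

-- membership/contains/get? bridges
theorem contains_iff_get?_isSome {κ ν : Type} [BEq κ] (d : PySem.Dict κ ν) (k : κ) :
    d.contains k = (d.get? k).isSome := by
  simp only [PySem.Dict.contains, PySem.Dict.get?, Option.isSome_map]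
  exact Eq.symm List.isSome_find?

-- string-level bridge: replace equality as a list fact
theorem str_replace_eq_iff (other test : String) (c : Char) (w : String) :
    (PySem.Str.replace other (String.ofList [c]) w = test)
      ↔ pvRepl c w.toList other.toList = test.toList := by
  constructor
  · intro h
    have := congrArg String.toList h
    simpa [PySem.Str.replace, replace_single] using this
  · intro h
    have : (PySem.Str.replace other (String.ofList [c]) w).toList = test.toList := by
      simpa [PySem.Str.replace, replace_single] using h
    exact String.toList_injective this

-- the per-character equivalence, for a character c of other whose swap list is swaps
theorem body_iff (test other : String) (swaps : List String) (c : Char)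
    (hc : c ∈ other.toList) :
    (∃ swap ∈ swaps, PySem.Str.replace other (String.ofList [c]) swap = test)
    ↔ ((if PySem.Int.mod (PySem.Str.len test - PySem.Str.len other) ((PySem.Str.count other (String.ofList [c]) : Int)) ≠ 0 then false
        else if PySem.Int.floordiv (PySem.Str.len test - PySem.Str.len other) ((PySem.Str.count other (String.ofList [c]) : Int)) + 1 < 0 then false
        else
          (PySem.Str.replace other (String.ofList [c])
              (PySem.Str.slice test (some (PySem.Str.find other (String.ofList [c])))
                (some (PySem.Str.find other (String.ofList [c]) + (PySem.Int.floordiv (PySem.Str.len test - PySem.Str.len other) ((PySem.Str.count other (String.ofList [c]) : Int)) + 1)))) == test)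
            && swaps.contains (PySem.Str.slice test (some (PySem.Str.find other (String.ofList [c])))
                (some (PySem.Str.find other (String.ofList [c]) + (PySem.Int.floordiv (PySem.Str.len test - PySem.Str.len other) ((PySem.Str.count other (String.ofList [c]) : Int)) + 1))))) = true) := by
  have hsl : (String.ofList [c]).toList = [c] := by simp
  have hcount : ((PySem.Str.count other (String.ofList [c]) : Nat) : Int)
      = ((other.toList.count c : Nat) : Int) := by
    simp [PySem.Str.count, hsl, count_single]
  have hKpos : 0 < other.toList.count c := List.count_pos_iff.mpr hc
  have hfind : PySem.Str.find other (String.ofList [c]) = (other.toList.idxOf c : Int) := by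
    simp only [PySem.Str.find, hsl]
    exact find_single _ _ hc
  constructor
  · rintro ⟨swap, hsw, hrep⟩
    have H : pvRepl c swap.toList other.toList = test.toList :=
      (str_replace_eq_iff other test c swap).mp hrep
    obtain ⟨hdiff, hslice⟩ := forward_facts hc H
    have hlen : PySem.Str.len test - PySem.Str.len other
        = ((other.toList.count c : Nat) : Int) * ((swap.toList.length : Int) - 1) := by
      rw [PySem.Str.len_eq, PySem.Str.len_eq]
      exact hdiff
    have hmod : PySem.Int.mod (PySem.Str.len test - PySem.Str.len other)
        ((other.toList.count c : Nat) : Int) = 0 :=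
      (PySem.Int.mod_eq_zero_iff_dvd _ _).mpr ⟨_, hlen⟩
    have hdiv : PySem.Int.floordiv (PySem.Str.len test - PySem.Str.len other)
        ((other.toList.count c : Nat) : Int) + 1 = (swap.toList.length : Int) := by
      rw [hlen]
      show Int.fdiv _ _ + 1 = _
      rw [Int.mul_fdiv_cancel_left _ (by exact_mod_cast hKpos.ne')]
      ring
    have hcand : PySem.Str.slice test (some (PySem.Str.find other (String.ofList [c])))
        (some (PySem.Str.find other (String.ofList [c]) + (PySem.Int.floordiv (PySem.Str.len test - PySem.Str.len other) ((other.toList.count c : Nat) : Int) + 1))) = swap := by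
      apply String.toList_injective
      rw [PySem.Str.toList_slice, hdiv, hfind]
      show PySem.List.slice test.toList (some ((other.toList.idxOf c : Nat) : Int))
          (some (((other.toList.idxOf c : Nat) : Int) + ((swap.toList.length : Nat) : Int))) = swap.toList
      rw [PySem.List.slice_natCast_add]
      exact hslice
    rw [hcount, if_neg (not_ne_iff.mpr hmod), hcand,
        if_neg (not_lt.mpr (by rw [hdiv]; positivity))]
    simp only [Bool.and_eq_true, beq_iff_eq]
    exact ⟨hrep, List.elem_eq_true_of_mem hsw⟩
  · intro h
    by_cases h1 : PySem.Int.mod (PySem.Str.len test - PySem.Str.len other) ((PySem.Str.count other (String.ofList [c]) : Int)) ≠ 0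
    · rw [if_pos h1] at h
      exact absurd h Bool.false_ne_true
    · rw [if_neg h1] at h
      by_cases h2 : PySem.Int.floordiv (PySem.Str.len test - PySem.Str.len other) ((PySem.Str.count other (String.ofList [c]) : Int)) + 1 < 0
      · rw [if_pos h2] at h
        exact absurd h Bool.false_ne_true
      · rw [if_neg h2] at h
        rw [Bool.and_eq_true, beq_iff_eq] at h
        exact ⟨_, List.mem_of_elem_eq_true h.2, h.1⟩

theorem main_eq (test other : String) (char_swaps : List (String × List String)) :
    find_swapped_match test other char_swaps = find_swapped_match_alt test other char_swaps := by
  unfold find_swapped_match find_swapped_match_alt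
  rw [Bool.eq_iff_iff]
  simp only [List.any_eq_true, PySem.Set.mem_ofList, List.mem_filter, Bool.and_eq_true, beq_iff_eq]
  constructor
  · rintro ⟨c, ⟨hc, hcont⟩, swap, hsw, hrep⟩
    refine ⟨c, hc, ?_⟩
    rw [contains_iff_get?_isSome] at hcont
    cases hg : (PySem.Dict.mk char_swaps).get? (String.ofList [c]) with
    | none => rw [hg] at hcont; simp at hcont
    | some swaps =>
      have hgd : (PySem.Dict.mk char_swaps).getD (String.ofList [c]) [] = swaps := by
        simp [PySem.Dict.getD, hg]
      rw [hgd] at hsw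
      exact (body_iff test other swaps c hc).mp ⟨swap, hsw, hrep⟩
  · rintro ⟨c, hc, hbody⟩
    cases hg : (PySem.Dict.mk char_swaps).get? (String.ofList [c]) with
    | none => rw [hg] at hbody; simp at hbody
    | some swaps =>
      rw [hg] at hbody
      obtain ⟨swap, hsw, hrep⟩ := (body_iff test other swaps c hc).mpr hbody
      have hgd : (PySem.Dict.mk char_swaps).getD (String.ofList [c]) [] = swaps := by
        simp [PySem.Dict.getD, hg]
      exact ⟨c, ⟨hc, by rw [contains_iff_get?_isSome, hg]; rfl⟩, swap, by rw [hgd]; exact hsw, hrep⟩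

-- ===== VERDICT (by name: the statement is the Claim_ definition above) =====
theorem find_swapped_match_spec : Claim_equal_find_swapped_match := by
  intro test other char_swaps _
  unfold Spec_find_swapped_match
  exact main_eq test other char_swaps
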